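-- pv_equiv track=rewrite | github.com/nevalions/ansible_base | filter_plugins/wg_routing_filters.py | peers_in_groups
-- ===== SOURCE A (Python) =====
-- def peers_in_groups(wg_peers, groups_dict, target_group_members):
--     """Return names of wg_peers whose host_group has members in target_group_members.
--
--     Args:
--         wg_peers: list of dicts from vault_wg_peers
--         groups_dict: Ansible groups dict (groups variable)
--         target_group_members: list of host names/IPs that define the target role
--                               (e.g. groups['bgp_routers'] or groups['kuber_small_workers'])
--
--     Returns:
--         list of peer names whose host_group overlaps with target_group_members
--     """
--     target_set = set(target_group_members)
--     result = []
--     for peer in wg_peers: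
--         host_group = peer.get("host_group")
--         if not host_group:
--             continue
--         group_members = groups_dict.get(host_group, [])
--         if set(group_members) & target_set:
--             result.append(peer["name"])
--     return result
-- ===== SOURCE B (Python) =====
-- def peers_in_groups(wg_peers, groups_dict, target_group_members):
--     target_set = set(target_group_members)
--     overlap_groups = {g for g, members in groups_dict.items()
--                       if set(members) & target_set}
--     return [p["name"] for p in wg_peers
--             if p.get("host_group") and p.get("host_group") in overlap_groups]
-- ===== Notes on version B (the rewrite author's own statement) =====
-- stated objective: alternative
-- what changed: B precomputes the set of group names whose member lists intersect the target set in one pass over groups_dict, then selects peer names with a single comprehension using membership in that set, instead of rebuilding a member set and intersecting it per peer.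
import Mathlib
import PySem

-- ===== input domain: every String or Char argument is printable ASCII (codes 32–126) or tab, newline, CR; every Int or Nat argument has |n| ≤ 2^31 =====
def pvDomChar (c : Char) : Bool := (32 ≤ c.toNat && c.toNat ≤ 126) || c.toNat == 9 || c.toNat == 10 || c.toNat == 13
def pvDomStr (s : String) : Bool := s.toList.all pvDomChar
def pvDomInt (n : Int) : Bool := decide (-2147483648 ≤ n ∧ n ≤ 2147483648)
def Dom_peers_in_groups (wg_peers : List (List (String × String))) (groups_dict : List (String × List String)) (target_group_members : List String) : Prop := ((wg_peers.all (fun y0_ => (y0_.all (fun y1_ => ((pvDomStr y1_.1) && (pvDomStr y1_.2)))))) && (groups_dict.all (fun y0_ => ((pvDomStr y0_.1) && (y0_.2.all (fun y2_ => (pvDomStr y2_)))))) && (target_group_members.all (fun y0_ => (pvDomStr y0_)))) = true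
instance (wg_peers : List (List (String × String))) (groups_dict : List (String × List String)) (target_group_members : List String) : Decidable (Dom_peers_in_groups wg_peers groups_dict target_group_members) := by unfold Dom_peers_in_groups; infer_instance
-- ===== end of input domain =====

-- B builds the set of overlapping group names once, then selects peers by membership;
-- A rebuilds a member set and intersects it for every peer.

-- ===== PORT A =====
-- literal port of A: target_set = set(...); for peer in wg_peers: append peer["name"] on overlap.
-- peer["name"] is read with getD "" : Pre_ excludes the inputs where "name" is missing there (KeyError).
def peers_in_groups (wg_peers : List (List (String × String))) (groups_dict : List (String × List String)) (target_group_members : List String) : List String :=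
  let target_set := PySem.Set.ofList target_group_members
  wg_peers.foldl (fun result peer =>
    match (PySem.Dict.mk peer).get? "host_group" with
    | none => result
    | some host_group =>
      if host_group = "" then result
      else
        let group_members := (PySem.Dict.mk groups_dict).getD host_group []
        if PySem.Set.inter (PySem.Set.ofList group_members) target_set = [] then result
        else result ++ [(PySem.Dict.mk peer).getD "name" ""]) []

-- ===== PORT B =====
-- literal port of Source B: one pass over groups_dict building the set comprehension
-- overlap_groups, then one list comprehension over wg_peers.
def peers_in_groups_alt (wg_peers : List (List (String × String))) (groups_dict : List (String × List String)) (target_group_members : List String) : List String :=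
  let target_set := PySem.Set.ofList target_group_members
  let overlap_groups := groups_dict.foldl (fun s p =>
    if PySem.Set.inter (PySem.Set.ofList p.2) target_set = [] then s
    else PySem.Set.add s p.1) PySem.Set.empty
  wg_peers.filterMap (fun p =>
    match (PySem.Dict.mk p).get? "host_group" with
    | none => none
    | some hg =>
      if hg ≠ "" ∧ PySem.Set.contains overlap_groups hg then
        some ((PySem.Dict.mk p).getD "name" "")
      else none)

-- ===== PRECONDITION & SPEC =====
-- Pre_ requires (a) distinct keys in groups_dict (it is a Python dict, so always true of real
-- inputs) and (b) that every peer A selects has a "name" key — exactly where A (and B) would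
-- raise KeyError; no input on which the Python A returns normally is excluded.
def Pre_peers_in_groups (wg_peers : List (List (String × String))) (groups_dict : List (String × List String)) (target_group_members : List String) : Prop :=
  (groups_dict.map Prod.fst).Nodup ∧
  ∀ peer ∈ wg_peers, ∀ hg, (PySem.Dict.mk peer).get? "host_group" = some hg → hg ≠ "" →
    PySem.Set.inter (PySem.Set.ofList ((PySem.Dict.mk groups_dict).getD hg [])) (PySem.Set.ofList target_group_members) ≠ [] →
    (PySem.Dict.mk peer).contains "name" = true
instance (wg_peers : List (List (String × String))) (groups_dict : List (String × List String)) (target_group_members : List String) : Decidable (Pre_peers_in_groups wg_peers groups_dict target_group_members) := by unfold Pre_peers_in_groups; infer_instance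

def pvWitness_peers_in_groups : (List (List (String × String))) × (List (String × List String)) × List String :=
  ([[("host_group", "g"), ("name", "p1")], [("name", "p3")]], [("g", ["a", "b"]), ("h", ["c"])], ["b"])

def Spec_peers_in_groups (wg_peers : List (List (String × String))) (groups_dict : List (String × List String)) (target_group_members : List String) (out : List String) : Prop := out = peers_in_groups_alt wg_peers groups_dict target_group_members
instance (wg_peers : List (List (String × String))) (groups_dict : List (String × List String)) (target_group_members : List String) (out : List String) : Decidable (Spec_peers_in_groups wg_peers groups_dict target_group_members out) := by unfold Spec_peers_in_groups; infer_instance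

-- ===== CLAIM (what is proved, stated in full; the proofs are below) =====
def Claim_equal_peers_in_groups : Prop := ∀ (wg_peers : List (List (String × String))) (groups_dict : List (String × List String)) (target_group_members : List String), Dom_peers_in_groups wg_peers groups_dict target_group_members → Pre_peers_in_groups wg_peers groups_dict target_group_members → Spec_peers_in_groups wg_peers groups_dict target_group_members (peers_in_groups wg_peers groups_dict target_group_members)

-- ===== LEMMAS AND PROOFS =====

-- membership in B's fold over groups_dict, for any starting set
theorem mem_overlap_fold (groups : List (String × List String)) (tset : PySem.Set String) (s : PySem.Set String) (hg : String) :
    hg ∈ groups.foldl (fun s p =>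
        if PySem.Set.inter (PySem.Set.ofList p.2) tset = [] then s
        else PySem.Set.add s p.1) s ↔
    hg ∈ s ∨ ∃ p ∈ groups, p.1 = hg ∧ PySem.Set.inter (PySem.Set.ofList p.2) tset ≠ [] := by
  induction groups generalizing s with
  | nil => simp
  | cons q rest ih =>
    simp only [List.foldl_cons]
    by_cases h : PySem.Set.inter (PySem.Set.ofList q.2) tset = []
    · rw [if_pos h, ih]
      simp only [List.mem_cons]
      constructor
      · rintro (hs | ⟨p, hp, rfl, hne⟩)
        · exact Or.inl hs
        · exact Or.inr ⟨p, Or.inr hp, rfl, hne⟩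
      · rintro (hs | ⟨p, (rfl | hp), rfl, hne⟩)
        · exact Or.inl hs
        · exact absurd h hne
        · exact Or.inr ⟨p, hp, rfl, hne⟩
    · rw [if_neg h, ih]
      simp only [PySem.Set.mem_add, List.mem_cons]
      constructor
      · rintro (⟨hs | rfl⟩ | ⟨p, hp, rfl, hne⟩)
        · exact Or.inl hs
        · exact Or.inr ⟨q, Or.inl rfl, rfl, h⟩
        · exact Or.inr ⟨p, Or.inr hp, rfl, hne⟩
      · rintro (hs | ⟨p, (rfl | hp), rfl, hne⟩)
        · exact Or.inl (Or.inl hs)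
        · exact Or.inl (Or.inr rfl)
        · exact Or.inr ⟨p, hp, rfl, hne⟩

-- with distinct keys, membership in B's overlap set ↔ A's per-peer intersection test
theorem overlap_contains_iff (groups : List (String × List String)) (tset : PySem.Set String) (hg : String)
    (hnd : (groups.map Prod.fst).Nodup) :
    PySem.Set.contains (groups.foldl (fun s p =>
        if PySem.Set.inter (PySem.Set.ofList p.2) tset = [] then s
        else PySem.Set.add s p.1) PySem.Set.empty) hg = true ↔
    PySem.Set.inter (PySem.Set.ofList ((PySem.Dict.mk groups).getD hg [])) tset ≠ [] := by
  rw [PySem.Set.contains_iff, mem_overlap_fold]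
  have hkeys : (PySem.Dict.mk groups).keys.Nodup := by simpa [PySem.Dict.keys, PySem.Dict.items] using hnd
  constructor
  · rintro (hs | ⟨p, hp, rfl, hne⟩)
    · simp [PySem.Set.empty] at hs
    · have : (PySem.Dict.mk groups).getD p.1 [] = p.2 :=
        PySem.Dict.getD_of_mem_items (PySem.Dict.mk groups)
          (by simpa [PySem.Dict.items] using hp) hkeys []
      rwa [this]
  · intro hne
    cases hcase : (PySem.Dict.mk groups).contains hg with
    | true =>
      rw [PySem.Dict.contains_eq_isSome_get?] at hcase
      obtain ⟨ms, hms⟩ := Option.isSome_iff_exists.mp hcase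
      have hmem : (hg, ms) ∈ groups := by
        simpa [PySem.Dict.items] using
          PySem.Dict.mem_items_of_get?_eq_some (PySem.Dict.mk groups) hms
      have hgd : (PySem.Dict.mk groups).getD hg [] = ms :=
        PySem.Dict.getD_of_mem_items (PySem.Dict.mk groups)
          (by simpa [PySem.Dict.items] using hmem) hkeys []
      exact Or.inr ⟨(hg, ms), hmem, rfl, by rwa [hgd] at hne⟩
    | false =>
      rw [PySem.Dict.getD_of_not_contains (PySem.Dict.mk groups) [] hcase] at hne
      simp [PySem.Set.inter, PySem.Set.ofList] at hne

-- A's fold equals accumulator ++ B's comprehension, peer by peer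
theorem fold_eq_acc_filterMap (wg : List (List (String × String))) (groups : List (String × List String))
    (target : List String) (acc : List String) (hnd : (groups.map Prod.fst).Nodup) :
    wg.foldl (fun result peer =>
      match (PySem.Dict.mk peer).get? "host_group" with
      | none => result
      | some host_group =>
        if host_group = "" then result
        else
          if PySem.Set.inter (PySem.Set.ofList ((PySem.Dict.mk groups).getD host_group []))
              (PySem.Set.ofList target) = [] then result
          else result ++ [(PySem.Dict.mk peer).getD "name" ""]) acc =
    acc ++ wg.filterMap (fun p =>
      match (PySem.Dict.mk p).get? "host_group" with
      | none => none
      | some hg =>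
        if hg ≠ "" ∧ PySem.Set.contains (groups.foldl (fun s q =>
            if PySem.Set.inter (PySem.Set.ofList q.2) (PySem.Set.ofList target) = [] then s
            else PySem.Set.add s q.1) PySem.Set.empty) hg = true then
          some ((PySem.Dict.mk p).getD "name" "")
        else none) := by
  induction wg generalizing acc with
  | nil => simp
  | cons peer rest ih =>
    cases hget : (PySem.Dict.mk peer).get? "host_group" with
    | none =>
      simp only [List.foldl_cons, List.filterMap_cons, hget]
      exact ih acc
    | some hg =>
      by_cases h0 : hg = ""
      · subst h0
        simp only [List.foldl_cons, List.filterMap_cons, hget]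
        rw [if_pos trivial, if_neg (fun h => h.1 rfl)]
        exact ih acc
      · by_cases hint : PySem.Set.inter (PySem.Set.ofList ((PySem.Dict.mk groups).getD hg []))
            (PySem.Set.ofList target) = []
        · have hc : ¬ PySem.Set.contains (groups.foldl (fun s q =>
              if PySem.Set.inter (PySem.Set.ofList q.2) (PySem.Set.ofList target) = [] then s
              else PySem.Set.add s q.1) PySem.Set.empty) hg = true := by
            rw [overlap_contains_iff groups _ hg hnd]; simp [hint]
          simp only [List.foldl_cons, List.filterMap_cons, hget]
          rw [if_neg h0, if_pos hint, if_neg (fun h => hc h.2)]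
          exact ih acc
        · have hc : PySem.Set.contains (groups.foldl (fun s q =>
              if PySem.Set.inter (PySem.Set.ofList q.2) (PySem.Set.ofList target) = [] then s
              else PySem.Set.add s q.1) PySem.Set.empty) hg = true :=
            (overlap_contains_iff groups _ hg hnd).mpr hint
          simp only [List.foldl_cons, List.filterMap_cons, hget]
          rw [if_neg h0, if_neg hint, if_pos ⟨h0, hc⟩,
            ih (acc ++ [(PySem.Dict.mk peer).getD "name" ""])]
          simp

-- ===== VERDICT (by name: the statement is the Claim_ definition above) =====
theorem peers_in_groups_spec : Claim_equal_peers_in_groups := by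
  intro wg groups target _ hpre
  unfold Spec_peers_in_groups peers_in_groups peers_in_groups_alt
  simpa using fold_eq_acc_filterMap wg groups target [] hpre.1
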